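-- pv_equiv track=rewrite | github.com/itstyren/InteractionMARL-Coop | envs/matrix_dilemma/_md_utils/utils.py | get_central_and_nearby_indices
-- ===== SOURCE A (Python) =====
-- def get_central_and_nearby_indices(dim, radius_length):
--     assert radius_length*2<dim,f"Expected radius_length< {int(dim/2)}, but got {radius_length}"
--
--     center_idx = dim // 2 * dim + dim // 2
--
--     # Convert the 1D index to 2D coordinates (assuming a square lattice)
--     center_x = center_idx % dim
--     center_y = center_idx // dim
--
--     # Initialize a list to store nearby indices within the circular region
--     nearby_indices = []
--
--     for x in range(center_x - radius_length, center_x + radius_length + 1):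
--         for y in range(center_y - radius_length, center_y + radius_length + 1):
--             # Check if the coordinates are within the circular region
--             if (x - center_x)**2 + (y - center_y)**2 <= radius_length**2:
--                 # Convert 2D coordinates back to 1D index
--                 nearby_indices.append(y * dim + x)
--
--     return center_idx, nearby_indices
-- ===== SOURCE B (Python) =====
-- import math
--
-- def get_central_and_nearby_indices(dim, radius_length):
--     assert radius_length*2<dim,f"Expected radius_length< {int(dim/2)}, but got {radius_length}"
--
--     c = dim // 2
--     center_idx = c * dim + c
--
--     # Stage 1: per column offset dx, the admissible y's around the center form
--     # a contiguous span of exact half-height isqrt(r^2 - dx^2); record (x, h).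
--     spans = [(c + dx, math.isqrt(radius_length * radius_length - dx * dx))
--              for dx in range(-radius_length, radius_length + 1)]
--     # Stage 2: expand every span into its indices (same x-outer/y-inner order as A).
--     nearby_indices = [y * dim + x
--                       for (x, h) in spans
--                       for y in range(c - h, c + h + 1)]
--
--     return center_idx, nearby_indices
-- ===== Notes on version B (the rewrite author's own statement) =====
-- stated objective: alternative
-- what changed: Two staged comprehensions replace the nested per-cell distance-test loops: first a list of (column, half-height) spans with the half-height computed exactly via math.isqrt(r^2-dx^2), then a flat expansion of each span into indices; no per-point membership check remains.
import Mathlib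
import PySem

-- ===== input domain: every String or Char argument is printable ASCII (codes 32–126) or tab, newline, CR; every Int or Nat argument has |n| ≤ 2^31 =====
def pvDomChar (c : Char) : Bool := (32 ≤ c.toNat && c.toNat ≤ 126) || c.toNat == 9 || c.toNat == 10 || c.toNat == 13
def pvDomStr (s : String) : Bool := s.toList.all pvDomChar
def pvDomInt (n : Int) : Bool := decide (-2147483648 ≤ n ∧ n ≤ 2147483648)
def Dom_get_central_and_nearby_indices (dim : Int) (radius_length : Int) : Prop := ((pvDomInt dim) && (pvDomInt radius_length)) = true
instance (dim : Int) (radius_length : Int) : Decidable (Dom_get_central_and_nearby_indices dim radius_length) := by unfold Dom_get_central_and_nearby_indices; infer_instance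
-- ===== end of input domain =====

-- B stages the computation: a list of (column, isqrt half-height) spans, then a flat expansion — no per-cell distance test; return-value equivalence on Pre_.


-- ===== PORT A =====
def get_central_and_nearby_indices (dim : Int) (radius_length : Int) : Int × List Int :=
  let center_idx := PySem.Int.floordiv dim 2 * dim + PySem.Int.floordiv dim 2
  let center_x := PySem.Int.mod center_idx dim
  let center_y := PySem.Int.floordiv center_idx dim
  let nearby :=
    (PySem.List.pyRange (center_x - radius_length) (center_x + radius_length + 1) 1).foldl
      (fun acc x =>
        (PySem.List.pyRange (center_y - radius_length) (center_y + radius_length + 1) 1).foldl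
          (fun acc y =>
            if (x - center_x)^2 + (y - center_y)^2 ≤ radius_length^2 then
              acc ++ [y * dim + x]
            else acc) acc) []
  (center_idx, nearby)

-- ===== PORT B =====
def get_central_and_nearby_indices_alt (dim : Int) (radius_length : Int) : Int × List Int :=
  let c := PySem.Int.floordiv dim 2
  let center_idx := c * dim + c
  -- stage 1: (x, h) spans; math.isqrt of a nonnegative int is Nat.sqrt
  let spans :=
    (PySem.List.pyRange (-radius_length) (radius_length + 1) 1).map
      (fun dx => (c + dx, ((radius_length * radius_length - dx * dx).toNat.sqrt : Int)))
  -- stage 2: flat expansion of each span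
  let nearby :=
    spans.flatMap (fun s => (PySem.List.pyRange (c - s.2) (c + s.2 + 1) 1).map (fun y => y * dim + s.1))
  (center_idx, nearby)

-- ===== PRECONDITION & SPEC =====
-- Pre_ excludes exactly the inputs where Python A raises: the assert (AssertionError
-- unless radius_length*2 < dim) and dim = 0 (ZeroDivisionError at '% dim').
def Pre_get_central_and_nearby_indices (dim : Int) (radius_length : Int) : Prop :=
  radius_length * 2 < dim ∧ dim ≠ 0
instance (dim : Int) (radius_length : Int) : Decidable (Pre_get_central_and_nearby_indices dim radius_length) := by unfold Pre_get_central_and_nearby_indices; infer_instance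
def pvWitness_get_central_and_nearby_indices : Int × Int := (5, 1)
def Spec_get_central_and_nearby_indices (dim : Int) (radius_length : Int) (out : Int × List Int) : Prop := out = get_central_and_nearby_indices_alt dim radius_length
instance (dim : Int) (radius_length : Int) (out : Int × List Int) : Decidable (Spec_get_central_and_nearby_indices dim radius_length out) := by unfold Spec_get_central_and_nearby_indices; infer_instance

-- ===== CLAIM (what is proved, stated in full; the proofs are below) =====
def Claim_equal_get_central_and_nearby_indices : Prop := ∀ (dim : Int) (radius_length : Int), Dom_get_central_and_nearby_indices dim radius_length → Pre_get_central_and_nearby_indices dim radius_length → Spec_get_central_and_nearby_indices dim radius_length (get_central_and_nearby_indices dim radius_length)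

-- ===== LEMMAS AND PROOFS =====

-- a range is a shift of its offset range
lemma pyRange_one_shift (a b c : Int) :
    PySem.List.pyRange a b 1 = (PySem.List.pyRange (a - c) (b - c) 1).map (fun t => c + t) := by
  apply List.ext_getElem
  · simp [PySem.List.length_pyRange_one]
  · intro i h1 h2
    simp [PySem.List.length_pyRange_one, PySem.List.getElem_pyRange_one] at h1 h2 ⊢
    omega

-- a flatMap over a range is a flatMap over its offset range
lemma flatMap_pyRange_shift {γ : Type} (a b c : Int) (F : Int → List γ) :
    (PySem.List.pyRange a b 1).flatMap F
      = (PySem.List.pyRange (a - c) (b - c) 1).flatMap (fun t => F (c + t)) := by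
  rw [pyRange_one_shift a b c, List.flatMap_map]

-- A filter by an interval predicate over a larger range is the sub-range.
lemma filter_pyRange_interval (a b c d : Int) (p : Int → Prop) [DecidablePred p]
    (hac : a ≤ c) (hdb : d + 1 ≤ b) (hcd : c ≤ d + 1)
    (hp : ∀ y, a ≤ y → y < b → (p y ↔ (c ≤ y ∧ y ≤ d))) :
    (PySem.List.pyRange a b 1).filter (fun y => decide (p y)) = PySem.List.pyRange c (d + 1) 1 := by
  rw [PySem.List.pyRange_one_append a c b hac (by omega),
      PySem.List.pyRange_one_append c (d+1) b hcd hdb]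
  rw [List.filter_append, List.filter_append]
  have h1 : (PySem.List.pyRange a c 1).filter (fun y => decide (p y)) = [] := by
    apply List.filter_eq_nil_iff.mpr
    intro y hy
    have := PySem.List.mem_pyRange_one.mp hy
    simp only [decide_eq_true_eq]
    intro hpy
    have := (hp y (by omega) (by omega)).mp hpy
    omega
  have h2 : (PySem.List.pyRange c (d+1) 1).filter (fun y => decide (p y)) = PySem.List.pyRange c (d+1) 1 := by
    apply List.filter_eq_self.mpr
    intro y hy
    have := PySem.List.mem_pyRange_one.mp hy
    simp only [decide_eq_true_eq]
    exact (hp y (by omega) (by omega)).mpr (by omega)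
  have h3 : (PySem.List.pyRange (d+1) b 1).filter (fun y => decide (p y)) = [] := by
    apply List.filter_eq_nil_iff.mpr
    intro y hy
    have := PySem.List.mem_pyRange_one.mp hy
    simp only [decide_eq_true_eq]
    intro hpy
    have := (hp y (by omega) (by omega)).mp hpy
    omega
  rw [h1, h2, h3]; simp

-- |t| ≤ isqrt m  ↔  t^2 ≤ m  (for 0 ≤ m)
lemma sq_le_iff_abs_le_sqrt (t m : Int) (hm : 0 ≤ m) :
    t^2 ≤ m ↔ (-(m.toNat.sqrt : Int) ≤ t ∧ t ≤ (m.toNat.sqrt : Int)) := by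
  have e1 : ((t.natAbs * t.natAbs : Nat) : Int) = t * t := Int.natAbs_mul_self
  have h2 : t.natAbs ≤ m.toNat.sqrt ↔ t.natAbs ^ 2 ≤ m.toNat := Nat.le_sqrt'
  rw [pow_two] at h2
  rw [sq, ← e1]
  generalize t.natAbs * t.natAbs = k at *
  omega

-- ===== VERDICT =====
theorem get_central_and_nearby_indices_spec : Claim_equal_get_central_and_nearby_indices := by
  intro dim radius_length _ hpre
  obtain ⟨hlt, hne⟩ := hpre
  unfold Spec_get_central_and_nearby_indices
  unfold get_central_and_nearby_indices get_central_and_nearby_indices_alt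
  simp only
  refine Prod.ext rfl ?_
  simp only
  set r := radius_length with hr
  set c := PySem.Int.floordiv dim 2 with hc
  set cx := PySem.Int.mod (c * dim + c) dim with hcx
  set cy := PySem.Int.floordiv (c * dim + c) dim with hcy
  by_cases hr0 : 0 ≤ r
  case neg =>
    rw [PySem.List.pyRange_one_eq_nil (show cx + r + 1 ≤ cx - r by omega),
        PySem.List.pyRange_one_eq_nil (show r + 1 ≤ -r by omega)]
    simp
  have hdimpos : 0 < dim := by omega
  have hcval : 0 ≤ c ∧ c < dim := by
    have h2 : c = dim / 2 := PySem.Int.floordiv_eq_ediv_of_pos (by norm_num)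
    omega
  have hcxc : cx = c := by
    rw [hcx, PySem.Int.mod_eq_emod_of_pos hdimpos]
    rw [show c * dim + c = c + dim * c by ring, Int.add_mul_emod_self_left]
    exact Int.emod_eq_of_lt hcval.1 hcval.2
  have hcyc : cy = c := by
    rw [hcy, PySem.Int.floordiv_eq_ediv_of_pos hdimpos]
    rw [show c * dim + c = c + dim * c by ring, Int.add_mul_ediv_left _ _ (by omega)]
    rw [Int.ediv_eq_zero_of_lt hcval.1 hcval.2]; ring
  rw [hcxc, hcyc]
  -- turn A's nested foldl into a flatMap over columns
  have hA : ∀ (acc : List Int),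
      (PySem.List.pyRange (c - r) (c + r + 1) 1).foldl
        (fun acc x =>
          (PySem.List.pyRange (c - r) (c + r + 1) 1).foldl
            (fun acc y => if (x - c)^2 + (y - c)^2 ≤ r^2 then acc ++ [y * dim + x] else acc) acc) acc
      = acc ++ (PySem.List.pyRange (c - r) (c + r + 1) 1).flatMap
          (fun x => ((PySem.List.pyRange (c - r) (c + r + 1) 1).filter
              (fun y => decide ((x - c)^2 + (y - c)^2 ≤ r^2))).map (fun y => y * dim + x)) := by
    intro acc
    rw [← PySem.List.foldl_append_eq_flatMap]
    apply PySem.List.foldl_congr_mem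
    intro a x _
    rw [PySem.List.foldl_append_ite (fun y => (x - c)^2 + (y - c)^2 ≤ r^2) (fun y => y * dim + x)]
  rw [hA, List.nil_append]
  -- reindex A's column range by offsets and match per column
  rw [flatMap_pyRange_shift (c - r) (c + r + 1) c]
  rw [show c - r - c = -r by ring, show c + r + 1 - c = r + 1 by ring]
  rw [List.flatMap_map]
  apply List.flatMap_congr  -- per-dx equality
  intro dx hdx
  have hdxm := PySem.List.mem_pyRange_one.mp hdx
  simp only
  have hm : (0:Int) ≤ r * r - dx * dx := by nlinarith
  set h : Int := ((r * r - dx * dx).toNat.sqrt : Int) with hh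
  have hh0 : 0 ≤ h := by positivity
  have hh2 : h * h ≤ r * r - dx * dx := by
    rw [hh]
    have hs := Nat.sqrt_le' (r * r - dx * dx).toNat
    rw [pow_two] at hs
    have h2 : (((r * r - dx * dx).toNat.sqrt : Int)) * ((r * r - dx * dx).toNat.sqrt : Int)
        ≤ (((r * r - dx * dx).toNat : Nat) : Int) := by exact_mod_cast hs
    rwa [Int.toNat_of_nonneg hm] at h2
  have hhr : h ≤ r := by nlinarith
  have hfil : (PySem.List.pyRange (c - r) (c + r + 1) 1).filter
      (fun y => decide ((c + dx - c)^2 + (y - c)^2 ≤ r^2)) = PySem.List.pyRange (c - h) (c + h + 1) 1 := by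
    have := filter_pyRange_interval (c - r) (c + r + 1) (c - h) (c + h)
      (fun y => (c + dx - c)^2 + (y - c)^2 ≤ r^2)
      (by omega) (by omega) (by omega)
      (by
        intro y _ _
        have hiff := sq_le_iff_abs_le_sqrt (y - c) (r * r - dx * dx) hm
        rw [hh] at *
        constructor
        · intro hle
          have : (y - c)^2 ≤ r * r - dx * dx := by nlinarith [hle]
          have := hiff.mp this; omega
        · intro hle
          have := hiff.mpr (by omega)
          nlinarith [this])
    simpa using this
  rw [hfil]
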